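-- pv_equiv track=rewrite | github.com/paulklemstine/factor | v30_final_codec.py | data_to_cf_ppt
-- ===== SOURCE A (Python) =====
-- def data_to_cf_ppt(data_bytes):
--     """
--     Encode bytes as CF partial quotients -> Stern-Brocot path -> PPT address.
--     Each byte b -> PQ = b+1 (1..256). Overhead: 1.125x (9 bits per byte avg).
--     Returns list of (a, b, c) primitive Pythagorean triples.
--     """
--     # Bitpack mode: each byte -> one partial quotient
--     pqs = [b + 1 for b in data_bytes]
--
--     # CF -> Stern-Brocot tree path
--     # Each PQ a_i means: go RIGHT a_i-1 times, then LEFT (alternating L/R)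
--     # The path encodes a unique rational p/q
--     # The PPT address is the Berggren matrix product along this path
--
--     # For efficiency, just return the PQ sequence and metadata
--     # The PPT triple is computed from the convergent p/q
--
--     # Compute convergents
--     triples = []
--     # Process in chunks of 8 PQs -> one PPT each
--     chunk_size = 8
--     for i in range(0, len(pqs), chunk_size):
--         chunk = pqs[i:i+chunk_size]
--         # Compute convergent p/q from partial quotients
--         p, q = 0, 1
--         for j in range(len(chunk) - 1, -1, -1):
--             p, q = q, chunk[j] * q + p
--         # Generate PPT from (p, q) where p > q > 0
--         if p < q:
--             p, q = q, p
--         if q == 0: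
--             q = 1
--         m, n = p, q
--         a = m*m - n*n
--         b = 2*m*n
--         c = m*m + n*n
--         if a < 0: a = -a
--         triples.append((a, b, c))
--
--     return triples, pqs
-- ===== SOURCE B (Python) =====
-- def _ppt(h1, k1):
--     p, q = (h1, k1) if k1 < h1 else (k1, h1)
--     if q == 0:
--         q = 1
--     return (abs(p * p - q * q), 2 * p * q, p * p + q * q)
--
-- def data_to_cf_ppt(data_bytes):
--     """Single-pass streaming re-implementation: runs the forward continuant
--     recurrence (two previous convergent pairs) over the quotient stream,
--     flushing a triple every 8 quotients; no index ranges, no slicing."""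
--     pqs = [b + 1 for b in data_bytes]
--     triples = []
--     h1, h2, k1, k2 = 1, 0, 0, 1
--     count = 0
--     for a in pqs:
--         h1, h2 = a * h1 + h2, h1
--         k1, k2 = a * k1 + k2, k1
--         count += 1
--         if count == 8:
--             triples.append(_ppt(h1, k1))
--             h1, h2, k1, k2 = 1, 0, 0, 1
--             count = 0
--     if count:
--         triples.append(_ppt(h1, k1))
--     return triples, pqs
-- ===== Notes on version B (the rewrite author's own statement) =====
-- stated objective: alternative
-- what changed: Replaces A's chunk-then-backward-reciprocal-loop structure (index ranges, slicing, reversed two-variable recurrence) with a single streaming pass of the forward continuant recurrence that maintains the two previous convergent pairs and flushes one triple every 8 quotients.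
import Mathlib
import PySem

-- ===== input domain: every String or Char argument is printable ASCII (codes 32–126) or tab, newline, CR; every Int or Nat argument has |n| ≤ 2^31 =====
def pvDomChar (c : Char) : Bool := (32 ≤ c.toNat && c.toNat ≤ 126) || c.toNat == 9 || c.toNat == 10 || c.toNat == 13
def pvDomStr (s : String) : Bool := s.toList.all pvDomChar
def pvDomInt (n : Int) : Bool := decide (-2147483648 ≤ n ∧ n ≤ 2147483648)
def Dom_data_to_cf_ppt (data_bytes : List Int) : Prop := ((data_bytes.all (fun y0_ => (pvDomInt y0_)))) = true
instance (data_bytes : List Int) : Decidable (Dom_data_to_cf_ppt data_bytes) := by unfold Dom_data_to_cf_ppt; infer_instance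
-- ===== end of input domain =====

-- B replaces A's per-chunk backward reciprocal loop by a single streaming pass of the
-- forward continuant recurrence, flushing a triple every 8 quotients (objective: alternative).

-- ===== PORT A =====
def data_to_cf_ppt (data_bytes : List Int) : (List (Int × Int × Int)) × List Int :=
  let pqs := data_bytes.map (fun b => b + 1)
  let triples := (PySem.List.pyRange 0 (pqs.length : Int) 8).foldl
    (fun (triples : List (Int × Int × Int)) i =>
      let chunk := PySem.List.slice pqs (some i) (some (i + 8))
      let pq := (PySem.List.pyRange ((chunk.length : Int) - 1) (-1) (-1)).foldl
        (fun (pq : Int × Int) j => (pq.2, PySem.List.pyGetD chunk j 0 * pq.2 + pq.1)) (0, 1)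
      let p := pq.1
      let q := pq.2
      let p' := if p < q then q else p
      let q' := if p < q then p else q
      let q'' := if q' = 0 then 1 else q'
      let m := p'
      let n := q''
      let a := m * m - n * n
      let b := 2 * m * n
      let c := m * m + n * n
      let a' := if a < 0 then -a else a
      triples ++ [(a', b, c)]) []
  (triples, pqs)

-- ===== PORT B =====
def pptOf (h1 k1 : Int) : Int × Int × Int :=
  let p := if k1 < h1 then h1 else k1
  let q0 := if k1 < h1 then k1 else h1
  let q := if q0 = 0 then 1 else q0
  (|p * p - q * q|, 2 * p * q, p * p + q * q)

-- single pass over pqs: forward continuant recurrence, flushed every 8 quotients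
def data_to_cf_ppt_alt (data_bytes : List Int) : (List (Int × Int × Int)) × List Int :=
  let pqs := data_bytes.map (fun b => b + 1)
  let st := pqs.foldl
    (fun (st : (List (Int × Int × Int)) × Int × Int × Int × Int × Int) a =>
      let tr := st.1
      let h1 := st.2.1
      let h2 := st.2.2.1
      let k1 := st.2.2.2.1
      let k2 := st.2.2.2.2.1
      let c := st.2.2.2.2.2
      let h1' := a * h1 + h2
      let h2' := h1
      let k1' := a * k1 + k2
      let k2' := k1
      let c' := c + 1
      if c' = 8 then (tr ++ [pptOf h1' k1'], 1, 0, 0, 1, 0)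
      else (tr, h1', h2', k1', k2', c'))
    ([], 1, 0, 0, 1, 0)
  let triples := if st.2.2.2.2.2 ≠ 0 then st.1 ++ [pptOf st.2.1 st.2.2.2.1] else st.1
  (triples, pqs)

-- ===== PRECONDITION & SPEC =====
def Spec_data_to_cf_ppt (data_bytes : List Int) (out : (List (Int × Int × Int)) × List Int) : Prop := out = data_to_cf_ppt_alt data_bytes
instance (data_bytes : List Int) (out : (List (Int × Int × Int)) × List Int) : Decidable (Spec_data_to_cf_ppt data_bytes out) := by unfold Spec_data_to_cf_ppt; infer_instance

-- ===== CLAIM (what is proved, stated in full; the proofs are below) =====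
def Claim_equal_data_to_cf_ppt : Prop := ∀ (data_bytes : List Int), Dom_data_to_cf_ppt data_bytes → Spec_data_to_cf_ppt data_bytes (data_to_cf_ppt data_bytes)

-- ===== LEMMAS AND PROOFS =====

-- A's backward loop as structural recursion
def cfBack : List Int → Int × Int
  | [] => (0, 1)
  | a :: t => let pq := cfBack t; (pq.2, a * pq.2 + pq.1)

-- 2x2 integer matrices as flat 4-tuples
def m2 : (Int × Int × Int × Int) → (Int × Int × Int × Int) → Int × Int × Int × Int
  | (a, b, c, d), (e, f, g, h) => (a*e + b*g, a*f + b*h, c*e + d*g, c*f + d*h)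

def mQ (a : Int) : Int × Int × Int × Int := (a, 1, 1, 0)

def cfP : List Int → Int × Int × Int × Int
  | [] => (1, 0, 0, 1)
  | a :: t => m2 (mQ a) (cfP t)

-- B's forward recurrence on the 4-tuple alone
def fwdStep (st : Int × Int × Int × Int) (a : Int) : Int × Int × Int × Int :=
  (a * st.1 + st.2.1, st.1, a * st.2.2.1 + st.2.2.2, st.2.2.1)

def fwdF (l : List Int) : Int × Int × Int × Int := l.foldl fwdStep (1, 0, 0, 1)

theorem m2_assoc (x y z : Int × Int × Int × Int) : m2 (m2 x y) z = m2 x (m2 y z) := by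
  obtain ⟨a, b, c, d⟩ := x; obtain ⟨e, f, g, h⟩ := y; obtain ⟨i, j, k, l⟩ := z
  simp only [m2, Prod.mk.injEq]
  refine ⟨by ring, by ring, by ring, by ring⟩

theorem m2_one_right (x : Int × Int × Int × Int) : m2 x (1, 0, 0, 1) = x := by
  obtain ⟨a, b, c, d⟩ := x; simp [m2]

theorem m2_one_left (x : Int × Int × Int × Int) : m2 (1, 0, 0, 1) x = x := by
  obtain ⟨a, b, c, d⟩ := x; simp [m2]

theorem fwd_eq_m2 (l : List Int) : ∀ X : Int × Int × Int × Int,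
    l.foldl fwdStep X = m2 X (cfP l) := by
  induction l with
  | nil => intro X; simp [cfP, m2_one_right]
  | cons a t ih =>
    intro X
    have hstep : fwdStep X a = m2 X (mQ a) := by
      obtain ⟨h1, h2, k1, k2⟩ := X
      simp only [fwdStep, m2, mQ, Prod.mk.injEq]
      refine ⟨by ring, by ring, by ring, by ring⟩
    simp only [List.foldl_cons, hstep, ih, cfP]
    rw [← m2_assoc]

theorem back_eq_P (l : List Int) : cfBack l = ((cfP l).2.2.1, (cfP l).1) := by
  induction l with
  | nil => simp [cfBack, cfP]
  | cons a t ih =>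
    simp only [cfBack, cfP, ih]
    obtain ⟨A, B, C, D⟩ := cfP t
    simp only [m2, mQ, Prod.mk.injEq]
    refine ⟨by ring, by ring⟩

-- inner A loop computes cfBack
theorem innerA (chunk : List Int) :
    (PySem.List.pyRange ((chunk.length : Int) - 1) (-1) (-1)).foldl
      (fun (pq : Int × Int) j => (pq.2, PySem.List.pyGetD chunk j 0 * pq.2 + pq.1)) (0, 1)
    = cfBack chunk := by
  induction chunk with
  | nil => simp [cfBack]
  | cons x t ih =>
    have hlen : (((x :: t).length : Int)) - 1 = (t.length : Int) := by
      simp [List.length_cons]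
    rw [hlen, PySem.List.pyRange_neg_one]
    have h2 : ((t.length : Int) - (-1)).toNat = t.length + 1 := by omega
    rw [h2, List.range_succ, List.map_append, List.foldl_append]
    simp only [List.foldl_map]
    rw [PySem.List.pyRange_neg_one] at ih
    have h3 : ((t.length : Int) - 1 - (-1)).toNat = t.length := by omega
    rw [h3, List.foldl_map] at ih
    have hcong : List.foldl
        (fun (pq : Int × Int) k =>
          (pq.2, PySem.List.pyGetD (x :: t) ((t.length : Int) - (k : Nat)) 0 * pq.2 + pq.1))
        (0, 1) (List.range t.length)
      = List.foldl
        (fun (pq : Int × Int) k =>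
          (pq.2, PySem.List.pyGetD t ((t.length : Int) - 1 - (k : Nat)) 0 * pq.2 + pq.1))
        (0, 1) (List.range t.length) := by
      apply PySem.List.foldl_congr_mem
      intro acc k hk
      have hk' : k < t.length := List.mem_range.mp hk
      have e1 : ((t.length : Int) - (k : Nat)) = ((t.length - k : Nat) : Int) := by omega
      have e2 : ((t.length : Int) - 1 - (k : Nat)) = ((t.length - 1 - k : Nat) : Int) := by omega
      rw [e1, e2, PySem.List.pyGetD_natCast, PySem.List.pyGetD_natCast]
      have e3 : t.length - k = (t.length - 1 - k) + 1 := by omega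
      rw [e3, List.getD_cons_succ]
    rw [hcong, ih]
    simp [cfBack, PySem.List.pyGetD_zero_cons]

-- the triple produced for one chunk, via the forward recurrence
def tripleB (chunk : List Int) : Int × Int × Int :=
  pptOf (fwdF chunk).1 (fwdF chunk).2.2.1

-- A's per-chunk body, named for the proofs (definitionally the body inside data_to_cf_ppt)
def bodyA (chunk : List Int) : Int × Int × Int :=
  let pq := (PySem.List.pyRange ((chunk.length : Int) - 1) (-1) (-1)).foldl
    (fun (pq : Int × Int) j => (pq.2, PySem.List.pyGetD chunk j 0 * pq.2 + pq.1)) (0, 1)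
  let p := pq.1
  let q := pq.2
  let p' := if p < q then q else p
  let q' := if p < q then p else q
  let q'' := if q' = 0 then 1 else q'
  let m := p'
  let n := q''
  let a := m * m - n * n
  let b := 2 * m * n
  let c := m * m + n * n
  let a' := if a < 0 then -a else a
  (a', b, c)

theorem portA_eq (data_bytes : List Int) :
    data_to_cf_ppt data_bytes =
      ((PySem.List.pyRange 0 ((data_bytes.map (fun b => b + 1)).length : Int) 8).foldl
        (fun (triples : List (Int × Int × Int)) i =>
          triples ++ [bodyA (PySem.List.slice (data_bytes.map (fun b => b + 1)) (some i) (some (i + 8)))]) [],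
       data_bytes.map (fun b => b + 1)) := rfl

theorem if_neg_abs (z : Int) : (if z < 0 then -z else z) = |z| := by
  rcases lt_or_ge z 0 with h | h
  · rw [if_pos h, abs_of_neg h]
  · rw [if_neg (not_lt.mpr h), abs_of_nonneg h]

-- A's per-chunk body equals tripleB
theorem chunk_triple (chunk : List Int) : bodyA chunk = tripleB chunk := by
  unfold bodyA tripleB pptOf fwdF
  rw [innerA, back_eq_P, fwd_eq_m2, m2_one_left]
  rcases hP : cfP chunk with ⟨A, B, C, D⟩
  simp only [if_neg_abs]

-- the chunked specification both programs compute
def chunks : List Int → List (Int × Int × Int)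
  | [] => []
  | x :: t =>
    tripleB ((x :: t).take 8) :: chunks ((x :: t).drop 8)
  termination_by l => l.length
  decreasing_by simp

theorem chunks_cons (x : Int) (t : List Int) :
    chunks (x :: t) = tripleB ((x :: t).take 8) :: chunks ((x :: t).drop 8) := by
  rw [chunks]

theorem outerB : ∀ (m : Nat) (l : List Int) (acc : List (Int × Int × Int)),
    l.length ≤ 8 * m → 8 * m < l.length + 8 →
    (List.range m).foldl (fun acc k => acc ++ [tripleB ((l.drop (8 * k)).take 8)]) acc
      = acc ++ chunks l := by
  intro m
  induction m with
  | zero =>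
    intro l acc h1 h2
    have hl : l = [] := List.eq_nil_of_length_eq_zero (by omega)
    subst hl
    simp [chunks]
  | succ m ih =>
    intro l acc h1 h2
    have hlen : 0 < l.length := by omega
    have hne : l ≠ [] := by intro h; subst h; simp at hlen
    obtain ⟨x, t, rfl⟩ := List.exists_cons_of_ne_nil hne
    rw [List.range_succ_eq_map, List.foldl_cons, List.foldl_map]
    have hfun : (fun (acc : List (Int × Int × Int)) (k : Nat) =>
          acc ++ [tripleB (((x :: t).drop (8 * Nat.succ k)).take 8)])
        = fun acc k => acc ++ [tripleB ((((x :: t).drop 8).drop (8 * k)).take 8)] := by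
      funext acc k
      rw [List.drop_drop]
      have : 8 * Nat.succ k = 8 + 8 * k := by omega
      rw [this]
    rw [hfun, ih ((x :: t).drop 8) _
      (by simp only [List.length_drop, List.length_cons] at h1 h2 ⊢; omega)
      (by simp only [List.length_drop, List.length_cons] at h1 h2 ⊢; omega)]
    rw [chunks_cons]
    simp

-- ==== B side ====

-- B's loop step and final flush, named for the proofs (definitionally the body of data_to_cf_ppt_alt)
def stepB (st : (List (Int × Int × Int)) × Int × Int × Int × Int × Int) (a : Int) :
    (List (Int × Int × Int)) × Int × Int × Int × Int × Int :=
  let tr := st.1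
  let h1 := st.2.1
  let h2 := st.2.2.1
  let k1 := st.2.2.2.1
  let k2 := st.2.2.2.2.1
  let c := st.2.2.2.2.2
  let h1' := a * h1 + h2
  let h2' := h1
  let k1' := a * k1 + k2
  let k2' := k1
  let c' := c + 1
  if c' = 8 then (tr ++ [pptOf h1' k1'], 1, 0, 0, 1, 0)
  else (tr, h1', h2', k1', k2', c')

def flushB (st : (List (Int × Int × Int)) × Int × Int × Int × Int × Int) :
    List (Int × Int × Int) :=
  if st.2.2.2.2.2 ≠ 0 then st.1 ++ [pptOf st.2.1 st.2.2.2.1] else st.1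

theorem portB_eq (data_bytes : List Int) :
    data_to_cf_ppt_alt data_bytes =
      (flushB ((data_bytes.map (fun b => b + 1)).foldl stepB ([], 1, 0, 0, 1, 0)),
       data_bytes.map (fun b => b + 1)) := rfl

-- processing one chunk (≤ 8 quotients) from a fresh state
theorem stepB_chunk : ∀ (c : List Int), c.length ≤ 8 → ∀ acc : List (Int × Int × Int),
    c.foldl stepB (acc, 1, 0, 0, 1, 0) =
      if c.length = 8 then (acc ++ [tripleB c], 1, 0, 0, 1, 0)
      else (acc, (fwdF c).1, (fwdF c).2.1, (fwdF c).2.2.1, (fwdF c).2.2.2, (c.length : Int)) := by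
  intro c
  induction c using List.reverseRecOn with
  | nil => intro _ acc; simp [fwdF]
  | append_singleton d a ih =>
    intro hlen acc
    have hd : d.length ≤ 8 := by simp at hlen; omega
    have hd7 : d.length ≠ 8 := by simp at hlen; omega
    rw [List.foldl_append, ih hd acc, if_neg hd7, List.foldl_cons, List.foldl_nil]
    have hfwd : fwdF (d ++ [a]) = fwdStep (fwdF d) a := by
      simp [fwdF, List.foldl_append]
    simp only [stepB, List.length_append, List.length_cons, List.length_nil, Nat.zero_add]
    by_cases h8 : d.length + 1 = 8
    · have hc : ((d.length : Int) + 1) = 8 := by omega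
      rw [if_pos hc, if_pos h8, tripleB, hfwd]
      simp [fwdStep]
    · have hc : ((d.length : Int) + 1) ≠ 8 := by omega
      rw [if_neg hc, if_neg h8, hfwd]
      simp only [fwdStep, Prod.mk.injEq]
      refine ⟨trivial, trivial, trivial, trivial, trivial, by push_cast; ring⟩

theorem flush_loopB : ∀ (n : Nat) (l : List Int), l.length = n → ∀ acc : List (Int × Int × Int),
    flushB (l.foldl stepB (acc, 1, 0, 0, 1, 0)) = acc ++ chunks l := by
  intro n
  induction n using Nat.strong_induction_on with
  | _ n ih =>
    intro l hl acc
    by_cases hlen : l.length < 8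
    · rw [stepB_chunk l (by omega) acc, if_neg (by omega)]
      cases l with
      | nil => simp [flushB, chunks]
      | cons x t =>
        rw [chunks_cons]
        have ht : (x :: t).take 8 = x :: t := List.take_of_length_le (by omega)
        have hdr : (x :: t).drop 8 = [] := List.drop_eq_nil_of_le (by omega)
        rw [ht, hdr]
        unfold flushB
        rw [if_pos (by simp; omega)]
        simp [tripleB, chunks]
    · have hsplit : l.take 8 ++ l.drop 8 = l := List.take_append_drop 8 l
      conv_lhs => rw [← hsplit]
      rw [List.foldl_append, stepB_chunk (l.take 8) (by simp) acc,
        if_pos (by simp; omega),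
        ih (l.drop 8).length (by simp; omega) (l.drop 8) rfl]
      have hne : l ≠ [] := by intro h; subst h; simp at hlen
      obtain ⟨x, t, rfl⟩ := List.exists_cons_of_ne_nil hne
      rw [chunks_cons]
      simp

-- ===== VERDICT (by name: the statement is the Claim_ definition above) =====
theorem data_to_cf_ppt_spec : Claim_equal_data_to_cf_ppt := by
  intro db _
  unfold Spec_data_to_cf_ppt
  rw [portA_eq, portB_eq]
  refine Prod.ext ?_ rfl
  simp only
  generalize (db.map (fun b => b + 1)) = pqs
  rw [flush_loopB pqs.length pqs rfl []]
  rw [PySem.List.pyRange_of_pos 0 (pqs.length : Int) (by norm_num)]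
  by_cases h0 : pqs.length = 0
  · have hnil : pqs = [] := by
      cases pqs with
      | nil => rfl
      | cons y ys => simp at h0
    subst hnil
    simp [chunks]
  · have hpos : (0:Int) < (pqs.length : Int) := by exact_mod_cast Nat.pos_of_ne_zero h0
    rw [if_pos hpos, List.foldl_map]
    have hfun : (fun (acc : List (Int × Int × Int)) (k : Nat) =>
          acc ++ [bodyA (PySem.List.slice pqs (some (0 + 8 * (k : Int))) (some (0 + 8 * (k : Int) + 8)))])
        = fun acc k => acc ++ [tripleB ((pqs.drop (8 * k)).take 8)] := by
      funext acc k
      have e : (0 + 8 * (k : Int)) = ((8 * k : Nat) : Int) := by push_cast; ring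
      have e2 : (0 + 8 * (k : Int) + 8) = ((8 * k : Nat) : Int) + ((8 : Nat) : Int) := by push_cast; ring
      rw [e2, e, PySem.List.slice_natCast_add, chunk_triple]
    rw [hfun]
    have hM : pqs.length ≤ 8 * (((pqs.length : Int) - 0 + 8 - 1) / 8).toNat ∧
        8 * (((pqs.length : Int) - 0 + 8 - 1) / 8).toNat < pqs.length + 8 := by
      have e : ((pqs.length : Int) - 0 + 8 - 1) = ((pqs.length + 7 : Nat) : Int) := by push_cast; ring
      rw [e]
      have e2 : (((pqs.length + 7 : Nat) : Int)) / (8 : Int) = (((pqs.length + 7) / 8 : Nat) : Int) := by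
        exact_mod_cast Int.natCast_div (pqs.length + 7) 8
      rw [e2, Int.toNat_natCast]
      omega
    exact outerB _ pqs [] hM.1 hM.2
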